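-- pv_equiv track=rewrite | github.com/LucasConde22/TPs-TDA | Guías/Backtracking/12.py | _hallar_sumatoria
-- ===== SOURCE A (Python) =====
-- def _hallar_sumatoria(i, sumatoria_act, lista_act, lista, n):
--     if sumatoria_act == n or i == len(lista): # Devuelve la lista que suma n o su maximización
--         return lista_act[:], sumatoria_act
--
--     result, sum_obtenida = [], 0
--     if sumatoria_act + lista[i] <= n: # Si me paso, recorto esta rama
--         lista_act.append(lista[i])
--         result, sum_obtenida = _hallar_sumatoria(i + 1, sumatoria_act + lista[i], lista_act, lista, n)
--         if sum_obtenida == n: # Si ya encontré solución, devuelvo de una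
--             return result, sum_obtenida
--         lista_act.pop()
--
--     result2, sum_obtenida2 = _hallar_sumatoria(i + 1, sumatoria_act, lista_act, lista, n) # Busco una solución mejor
--     if sum_obtenida2 > sum_obtenida:
--         return result2, sum_obtenida2
--     return result, sum_obtenida
-- ===== SOURCE B (Python) =====
-- def _hallar_sumatoria(i, sumatoria_act, lista_act, lista, n):
--     # Iterative backtracking: an explicit frame stack replaces the recursion,
--     # the running selection is threaded as a value (the input list is not mutated).
--     stack = []
--     control = ('call', i, sumatoria_act, list(lista_act))
--     while True:
--         if control[0] == 'call':
--             _, j, s, acc = control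
--             if s == n or j == len(lista):
--                 control = ('ret', acc, s, acc)
--             elif s + lista[j] <= n:
--                 stack.append(('first', j, s))
--                 control = ('call', j + 1, s + lista[j], acc + [lista[j]])
--             else:
--                 stack.append(('second', [], 0))
--                 control = ('call', j + 1, s, acc)
--         else:
--             _, result, total, acc = control
--             if not stack:
--                 return result, total
--             frame = stack.pop()
--             if frame[0] == 'first':
--                 _, j, s = frame
--                 if total == n:
--                     control = ('ret', result, total, acc)
--                 else:
--                     stack.append(('second', result, total))
--                     control = ('call', j + 1, s, acc[:-1])
--             else:
--                 _, result1, total1 = frame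
--                 if total > total1:
--                     control = ('ret', result, total, acc)
--                 else:
--                     control = ('ret', result1, total1, acc)
-- ===== Notes on version B (the rewrite author's own statement) =====
-- stated objective: alternative
-- what changed: The recursive backtracking is re-expressed as an iterative engine: an explicit stack of defunctionalized frames ('first'/'second' continuations) drives a single while loop, and the current selection is threaded as a value instead of appending/popping a shared mutable list (the caller's lista_act is no longer mutated; return value is identical).
import Mathlib
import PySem

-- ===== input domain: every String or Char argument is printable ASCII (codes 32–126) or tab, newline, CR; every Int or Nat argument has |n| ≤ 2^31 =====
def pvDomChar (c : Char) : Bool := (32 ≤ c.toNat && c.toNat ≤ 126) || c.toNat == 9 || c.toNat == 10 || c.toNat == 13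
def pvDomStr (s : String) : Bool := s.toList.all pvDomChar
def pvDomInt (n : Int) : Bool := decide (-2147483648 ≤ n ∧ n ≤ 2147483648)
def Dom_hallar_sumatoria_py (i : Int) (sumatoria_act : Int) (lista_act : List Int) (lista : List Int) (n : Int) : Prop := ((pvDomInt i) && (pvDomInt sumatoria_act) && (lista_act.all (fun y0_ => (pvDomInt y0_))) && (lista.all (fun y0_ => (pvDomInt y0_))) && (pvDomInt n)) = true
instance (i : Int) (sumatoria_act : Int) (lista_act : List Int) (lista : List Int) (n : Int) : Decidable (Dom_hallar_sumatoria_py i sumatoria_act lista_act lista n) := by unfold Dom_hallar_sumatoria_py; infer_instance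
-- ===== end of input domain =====

-- B re-expresses the recursive backtracking as an explicit-stack iterative engine
-- (defunctionalized 'first'/'second' frames, selection threaded as a value); equivalence is
-- about the RETURN value only — the original Python mutates lista_act in place, B does not.


-- ===== PORT A =====
-- A threads the mutable lista_act: each recursive step returns ((result list, sum), final
-- state of lista_act).  Fuel = number of steps from i to len(lista); the `none` branch of
-- pyGet? is Python's IndexError, excluded by Pre_.
def pvARec (L : List Int) (n : Int) : Nat → Int → Int → List Int → (List Int × Int) × List Int
  | 0, _i, s, acc => ((acc, s), acc)
  | fuel+1, i, s, acc =>
    if s = n ∨ i = (L.length : Int) then ((acc, s), acc)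
    else
      match PySem.List.pyGet? L i with
      | none => (([], 0), acc)   -- IndexError in Python (outside Pre_)
      | some x =>
        let step :=
          if s + x ≤ n then
            let r1 := pvARec L n fuel (i+1) (s+x) (acc ++ [x])
            if r1.1.2 = n then Sum.inl r1                         -- early return, no pop
            else Sum.inr (r1.1, r1.2.dropLast)                    -- lista_act.pop()
          else Sum.inr (([], 0), acc)
        match step with
        | Sum.inl out => out
        | Sum.inr (b1, acc2) =>
          let r2 := pvARec L n fuel (i+1) s acc2
          if r2.1.2 > b1.2 then (r2.1, r2.2) else (b1, r2.2)

def hallar_sumatoria_py (i : Int) (sumatoria_act : Int) (lista_act : List Int) (lista : List Int) (n : Int) : List Int × Int :=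
  (pvARec lista n ((lista.length - i).toNat) i sumatoria_act lista_act).1

-- ===== PORT B =====
-- Source B's machine: frames pushed on the explicit stack ('first' j s / 'second' result total)
-- and the control value ('call' j s acc / 'ret' result total acc).
inductive PvFrame : Type
  | first : Int → Int → PvFrame
  | second : List Int → Int → PvFrame
deriving DecidableEq, Repr

inductive PvCtrl : Type
  | call : Int → Int → List Int → PvCtrl
  | ret : List Int → Int → List Int → PvCtrl
deriving DecidableEq, Repr

-- one `while True` iteration per fuel unit; `none` = fuel exhausted (the Python loop has no
-- bound; the fuel below is shown sufficient)
def pvRun (L : List Int) (n : Int) : Nat → List PvFrame → PvCtrl → Option (List Int × Int)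
  | 0, _, _ => none
  | f+1, K, PvCtrl.call j s acc =>
    if s = n ∨ j = (L.length : Int) then pvRun L n f K (PvCtrl.ret acc s acc)
    else
      match PySem.List.pyGet? L j with
      | none => pvRun L n f K (PvCtrl.ret [] 0 acc)   -- IndexError in Python (outside Pre_)
      | some x =>
        if s + x ≤ n then pvRun L n f (PvFrame.first j s :: K) (PvCtrl.call (j+1) (s+x) (acc ++ [x]))
        else pvRun L n f (PvFrame.second [] 0 :: K) (PvCtrl.call (j+1) s acc)
  | _+1, [], PvCtrl.ret r t _ => some (r, t)
  | f+1, PvFrame.first j s :: K, PvCtrl.ret r t a =>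
    if t = n then pvRun L n f K (PvCtrl.ret r t a)
    else pvRun L n f (PvFrame.second r t :: K) (PvCtrl.call (j+1) s a.dropLast)
  | f+1, PvFrame.second r1 t1 :: K, PvCtrl.ret r2 t2 a =>
    if t2 > t1 then pvRun L n f K (PvCtrl.ret r2 t2 a) else pvRun L n f K (PvCtrl.ret r1 t1 a)

def hallar_sumatoria_py_alt (i : Int) (sumatoria_act : Int) (lista_act : List Int) (lista : List Int) (n : Int) : List Int × Int :=
  (pvRun lista n (2 ^ ((lista.length - i).toNat + 2)) [] (PvCtrl.call i sumatoria_act lista_act)).getD ([], 0)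

-- ===== PRECONDITION & SPEC =====
-- Pre_ excludes exactly the inputs where Python A raises IndexError: sumatoria_act ≠ n
-- (so the base case does not fire) and index i outside [-len(lista), len(lista)].
def Pre_hallar_sumatoria_py (i : Int) (sumatoria_act : Int) (lista_act : List Int) (lista : List Int) (n : Int) : Prop :=
  sumatoria_act = n ∨ (-(lista.length : Int) ≤ i ∧ i ≤ (lista.length : Int))
instance (i : Int) (sumatoria_act : Int) (lista_act : List Int) (lista : List Int) (n : Int) : Decidable (Pre_hallar_sumatoria_py i sumatoria_act lista_act lista n) := by unfold Pre_hallar_sumatoria_py; infer_instance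

def pvWitness_hallar_sumatoria_py : Int × Int × List Int × List Int × Int := (0, 0, [], [3, 1, 2], 4)

def Spec_hallar_sumatoria_py (i : Int) (sumatoria_act : Int) (lista_act : List Int) (lista : List Int) (n : Int) (out : List Int × Int) : Prop := out = hallar_sumatoria_py_alt i sumatoria_act lista_act lista n
instance (i : Int) (sumatoria_act : Int) (lista_act : List Int) (lista : List Int) (n : Int) (out : List Int × Int) : Decidable (Spec_hallar_sumatoria_py i sumatoria_act lista_act lista n out) := by unfold Spec_hallar_sumatoria_py; infer_instance

-- ===== CLAIM (what is proved, stated in full; the proofs are below) =====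
def Claim_equal_hallar_sumatoria_py : Prop := ∀ (i : Int) (sumatoria_act : Int) (lista_act : List Int) (lista : List Int) (n : Int), Dom_hallar_sumatoria_py i sumatoria_act lista_act lista n → Pre_hallar_sumatoria_py i sumatoria_act lista_act lista n → Spec_hallar_sumatoria_py i sumatoria_act lista_act lista n (hallar_sumatoria_py i sumatoria_act lista_act lista n)

-- ===== LEMMAS AND PROOFS =====

-- the returned SUM of pvARec does not depend on the accumulator
theorem pvARec_sum_indep (L : List Int) (n : Int) :
    ∀ (fuel : Nat) (j s : Int) (acc acc' : List Int),
      (pvARec L n fuel j s acc).1.2 = (pvARec L n fuel j s acc').1.2 := by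
  intro fuel
  induction fuel with
  | zero => intro j s acc acc'; rfl
  | succ fuel ih =>
    intro j s acc acc'
    simp only [pvARec]
    split
    · rfl
    · cases hx : PySem.List.pyGet? L j with
      | none => rfl
      | some x =>
        dsimp only
        by_cases hle : s + x ≤ n
        · simp only [if_pos hle]
          have h1 := ih (j+1) (s+x) (acc ++ [x]) (acc' ++ [x])
          by_cases hn : (pvARec L n fuel (j+1) (s+x) (acc ++ [x])).1.2 = n
          · simp only [if_pos hn, if_pos (h1 ▸ hn)]
            exact h1
          · simp only [if_neg hn, if_neg (h1 ▸ hn)]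
            have h2 := ih (j+1) s (pvARec L n fuel (j+1) (s+x) (acc ++ [x])).2.dropLast
              (pvARec L n fuel (j+1) (s+x) (acc' ++ [x])).2.dropLast
            by_cases hgt : (pvARec L n fuel (j+1) s (pvARec L n fuel (j+1) (s+x) (acc ++ [x])).2.dropLast).1.2
                > (pvARec L n fuel (j+1) (s+x) (acc ++ [x])).1.2
            · rw [if_pos hgt, if_pos (h1 ▸ h2 ▸ hgt)]
              simpa using h2
            · rw [if_neg hgt, if_neg (h1 ▸ h2 ▸ hgt)]
              simpa using h1
        · simp only [if_neg hle]
          have h2 := ih (j+1) s acc acc'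
          by_cases hgt : (pvARec L n fuel (j+1) s acc).1.2 > (0 : Int)
          · rw [if_pos hgt, if_pos (h2 ▸ hgt)]
            simpa using h2
          · rw [if_neg hgt, if_neg (h2 ▸ hgt)]

-- number of machine iterations that the call at (j, s) takes (accumulator-independent)
def pvCost (L : List Int) (n : Int) : Nat → Int → Int → Nat
  | 0, _, _ => 1
  | fr+1, j, s =>
    if s = n ∨ j = (L.length : Int) then 1
    else
      match PySem.List.pyGet? L j with
      | none => 1
      | some x =>
        if s + x ≤ n then
          if (pvARec L n fr (j+1) (s+x) []).1.2 = n then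
            pvCost L n fr (j+1) (s+x) + 2
          else
            pvCost L n fr (j+1) (s+x) + pvCost L n fr (j+1) s + 3
        else pvCost L n fr (j+1) s + 2

theorem pvCost_le (L : List Int) (n : Int) :
    ∀ (fr : Nat) (j s : Int), pvCost L n fr j s + 3 ≤ 2 ^ (fr + 2) := by
  intro fr
  induction fr with
  | zero => intro j s; norm_num [pvCost]
  | succ fr ih =>
    intro j s
    have hp : 2 ^ (fr + 1 + 2) = 2 ^ (fr + 2) + 2 ^ (fr + 2) := by ring
    have h4 : 4 ≤ 2 ^ (fr + 2) := by
      calc (4 : Nat) = 2 ^ 2 := rfl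
        _ ≤ 2 ^ (fr + 2) := Nat.pow_le_pow_right (by norm_num) (by omega)
    by_cases hb : s = n ∨ j = (L.length : Int)
    · have hc : pvCost L n (fr+1) j s = 1 := by simp [pvCost, hb]
      omega
    · cases hx : PySem.List.pyGet? L j with
      | none =>
        have hc : pvCost L n (fr+1) j s = 1 := by simp [pvCost, hb, hx]
        omega
      | some x =>
        have h1 := ih (j+1) (s+x)
        have h2 := ih (j+1) s
        by_cases hle : s + x ≤ n
        · by_cases hn : (pvARec L n fr (j+1) (s+x) []).1.2 = n
          · have hc : pvCost L n (fr+1) j s = pvCost L n fr (j+1) (s+x) + 2 := by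
              simp [pvCost, hb, hx, hle, hn]
            omega
          · have hc : pvCost L n (fr+1) j s
                = pvCost L n fr (j+1) (s+x) + pvCost L n fr (j+1) s + 3 := by
              simp [pvCost, hb, hx, hle, hn]
            omega
        · have hc : pvCost L n (fr+1) j s = pvCost L n fr (j+1) s + 2 := by
            simp [pvCost, hb, hx, hle]
          omega

-- one-step unfolding lemmas for the machine (controlled, so rewriting never cascades)
theorem pvRun_call_base (L : List Int) (n : Int) (f : Nat) (K : List PvFrame)
    (j s : Int) (acc : List Int) (h : s = n ∨ j = (L.length : Int)) :
    pvRun L n (f+1) K (PvCtrl.call j s acc) = pvRun L n f K (PvCtrl.ret acc s acc) := by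
  simp [pvRun, h]

theorem pvRun_call_none (L : List Int) (n : Int) (f : Nat) (K : List PvFrame)
    (j s : Int) (acc : List Int) (hb : ¬ (s = n ∨ j = (L.length : Int)))
    (hx : PySem.List.pyGet? L j = none) :
    pvRun L n (f+1) K (PvCtrl.call j s acc) = pvRun L n f K (PvCtrl.ret [] 0 acc) := by
  simp [pvRun, hb, hx]

theorem pvRun_call_le (L : List Int) (n : Int) (f : Nat) (K : List PvFrame)
    (j s x : Int) (acc : List Int) (hb : ¬ (s = n ∨ j = (L.length : Int)))
    (hx : PySem.List.pyGet? L j = some x) (hle : s + x ≤ n) :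
    pvRun L n (f+1) K (PvCtrl.call j s acc)
      = pvRun L n f (PvFrame.first j s :: K) (PvCtrl.call (j+1) (s+x) (acc ++ [x])) := by
  simp [pvRun, hb, hx, hle]

theorem pvRun_call_gt (L : List Int) (n : Int) (f : Nat) (K : List PvFrame)
    (j s x : Int) (acc : List Int) (hb : ¬ (s = n ∨ j = (L.length : Int)))
    (hx : PySem.List.pyGet? L j = some x) (hle : ¬ s + x ≤ n) :
    pvRun L n (f+1) K (PvCtrl.call j s acc)
      = pvRun L n f (PvFrame.second [] 0 :: K) (PvCtrl.call (j+1) s acc) := by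
  simp [pvRun, hb, hx, hle]

theorem pvRun_ret_nil (L : List Int) (n : Int) (f : Nat) (r : List Int) (t : Int)
    (a : List Int) : pvRun L n (f+1) [] (PvCtrl.ret r t a) = some (r, t) := rfl

theorem pvRun_ret_first_eq (L : List Int) (n : Int) (f : Nat) (K : List PvFrame)
    (j s : Int) (r : List Int) (t : Int) (a : List Int) (ht : t = n) :
    pvRun L n (f+1) (PvFrame.first j s :: K) (PvCtrl.ret r t a)
      = pvRun L n f K (PvCtrl.ret r t a) := by
  simp [pvRun, ht]

theorem pvRun_ret_first_ne (L : List Int) (n : Int) (f : Nat) (K : List PvFrame)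
    (j s : Int) (r : List Int) (t : Int) (a : List Int) (ht : ¬ t = n) :
    pvRun L n (f+1) (PvFrame.first j s :: K) (PvCtrl.ret r t a)
      = pvRun L n f (PvFrame.second r t :: K) (PvCtrl.call (j+1) s a.dropLast) := by
  simp [pvRun, ht]

theorem pvRun_ret_second (L : List Int) (n : Int) (f : Nat) (K : List PvFrame)
    (r1 : List Int) (t1 : Int) (r2 : List Int) (t2 : Int) (a : List Int) :
    pvRun L n (f+1) (PvFrame.second r1 t1 :: K) (PvCtrl.ret r2 t2 a)
      = if t2 > t1 then pvRun L n f K (PvCtrl.ret r2 t2 a)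
        else pvRun L n f K (PvCtrl.ret r1 t1 a) := rfl

-- simulation: the machine, started on a call with exactly its cost plus m fuel, reaches the
-- ret of pvARec's result with m fuel left
theorem pvSim (L : List Int) (n : Int) :
    ∀ (fr : Nat) (j s : Int), j ≤ (L.length : Int) → fr = (L.length - j).toNat →
      ∀ (acc : List Int) (K : List PvFrame) (m : Nat),
        pvRun L n (pvCost L n fr j s + m) K (PvCtrl.call j s acc)
          = pvRun L n m K (PvCtrl.ret (pvARec L n fr j s acc).1.1
              (pvARec L n fr j s acc).1.2 (pvARec L n fr j s acc).2) := by
  intro fr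
  induction fr with
  | zero =>
    intro j s hj hfr acc K m
    have hjlen : j = (L.length : Int) := by omega
    have hc : pvCost L n 0 j s = 1 := rfl
    rw [hc, Nat.add_comm, pvRun_call_base L n m K j s acc (Or.inr hjlen)]
    rfl
  | succ fr ih =>
    intro j s hj hfr acc K m
    have hfr' : fr = (L.length - (j+1)).toNat := by omega
    have hj' : j + 1 ≤ (L.length : Int) := by omega
    by_cases hb : s = n ∨ j = (L.length : Int)
    · have hc : pvCost L n (fr+1) j s = 1 := by simp [pvCost, hb]
      have hA : pvARec L n (fr+1) j s acc = ((acc, s), acc) := by simp [pvARec, hb]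
      rw [hc, Nat.add_comm, pvRun_call_base L n m K j s acc hb, hA]
    · cases hx : PySem.List.pyGet? L j with
      | none =>
        have hc : pvCost L n (fr+1) j s = 1 := by simp [pvCost, hb, hx]
        have hA : pvARec L n (fr+1) j s acc = (([], 0), acc) := by simp [pvARec, hb, hx]
        rw [hc, Nat.add_comm, pvRun_call_none L n m K j s acc hb hx, hA]
      | some x =>
        by_cases hle : s + x ≤ n
        · have hsum : (pvARec L n fr (j+1) (s+x) (acc ++ [x])).1.2
              = (pvARec L n fr (j+1) (s+x) []).1.2 := pvARec_sum_indep L n fr (j+1) (s+x) _ _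
          by_cases hn : (pvARec L n fr (j+1) (s+x) []).1.2 = n
          · -- early-return branch
            have ht : (pvARec L n fr (j+1) (s+x) (acc ++ [x])).1.2 = n := hsum.trans hn
            have hc : pvCost L n (fr+1) j s = pvCost L n fr (j+1) (s+x) + 2 := by
              simp [pvCost, hb, hx, hle, hn]
            have hA : pvARec L n (fr+1) j s acc = pvARec L n fr (j+1) (s+x) (acc ++ [x]) := by
              simp [pvARec, hb, hx, hle, ht]
            rw [hc, show pvCost L n fr (j+1) (s+x) + 2 + m
                  = (pvCost L n fr (j+1) (s+x) + (m + 1)) + 1 by omega]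
            rw [pvRun_call_le L n _ K j s x acc hb hx hle]
            rw [ih (j+1) (s+x) hj' hfr' (acc ++ [x]) (PvFrame.first j s :: K) (m+1)]
            rw [pvRun_ret_first_eq L n m K j s _ _ _ ht, hA]
          · have ht : ¬ (pvARec L n fr (j+1) (s+x) (acc ++ [x])).1.2 = n := by
              rw [hsum]; exact hn
            have hc : pvCost L n (fr+1) j s
                = pvCost L n fr (j+1) (s+x) + pvCost L n fr (j+1) s + 3 := by
              simp [pvCost, hb, hx, hle, hn]
            have hA : pvARec L n (fr+1) j s acc
                = (if (pvARec L n fr (j+1) s (pvARec L n fr (j+1) (s+x) (acc ++ [x])).2.dropLast).1.2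
                      > (pvARec L n fr (j+1) (s+x) (acc ++ [x])).1.2
                   then ((pvARec L n fr (j+1) s (pvARec L n fr (j+1) (s+x) (acc ++ [x])).2.dropLast).1,
                         (pvARec L n fr (j+1) s (pvARec L n fr (j+1) (s+x) (acc ++ [x])).2.dropLast).2)
                   else ((pvARec L n fr (j+1) (s+x) (acc ++ [x])).1,
                         (pvARec L n fr (j+1) s (pvARec L n fr (j+1) (s+x) (acc ++ [x])).2.dropLast).2)) := by
              simp [pvARec, hb, hx, hle, ht]
            rw [hc, show pvCost L n fr (j+1) (s+x) + pvCost L n fr (j+1) s + 3 + m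
                  = (pvCost L n fr (j+1) (s+x) + ((pvCost L n fr (j+1) s + (m + 1)) + 1)) + 1
                by omega]
            rw [pvRun_call_le L n _ K j s x acc hb hx hle]
            rw [ih (j+1) (s+x) hj' hfr' (acc ++ [x]) (PvFrame.first j s :: K) _]
            rw [pvRun_ret_first_ne L n _ K j s _ _ _ ht]
            rw [ih (j+1) s hj' hfr' _ (PvFrame.second _ _ :: K) (m+1)]
            rw [pvRun_ret_second, hA]
            split <;> rfl
        · have hc : pvCost L n (fr+1) j s = pvCost L n fr (j+1) s + 2 := by
            simp [pvCost, hb, hx, hle]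
          have hA : pvARec L n (fr+1) j s acc
              = (if (pvARec L n fr (j+1) s acc).1.2 > (0 : Int)
                 then ((pvARec L n fr (j+1) s acc).1, (pvARec L n fr (j+1) s acc).2)
                 else (([], 0), (pvARec L n fr (j+1) s acc).2)) := by
            simp [pvARec, hb, hx, hle]
          rw [hc, show pvCost L n fr (j+1) s + 2 + m
                = (pvCost L n fr (j+1) s + (m + 1)) + 1 by omega]
          rw [pvRun_call_gt L n _ K j s x acc hb hx hle]
          rw [ih (j+1) s hj' hfr' acc (PvFrame.second [] 0 :: K) (m+1)]
          rw [pvRun_ret_second, hA]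
          split <;> rfl

-- if sumatoria_act = n both programs stop at once
theorem pvARec_base (L : List Int) (n : Int) (fuel : Nat) (j : Int) (acc : List Int) :
    pvARec L n fuel j n acc = ((acc, n), acc) := by
  cases fuel <;> simp [pvARec]

-- ===== VERDICT (by name: the statement is the Claim_ definition above) =====
theorem hallar_sumatoria_py_spec : Claim_equal_hallar_sumatoria_py := by
  intro i s acc L n _hdom hpre
  unfold Spec_hallar_sumatoria_py hallar_sumatoria_py hallar_sumatoria_py_alt
  have h4 : 4 ≤ 2 ^ ((L.length - i).toNat + 2) := by
    calc (4 : Nat) = 2 ^ 2 := rfl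
      _ ≤ _ := Nat.pow_le_pow_right (by norm_num) (by omega)
  by_cases hs : s = n
  · rw [hs, pvARec_base L n _ i acc]
    obtain ⟨m, hm⟩ : ∃ m, 2 ^ ((L.length - i).toNat + 2) = m + 2 :=
      ⟨2 ^ ((L.length - i).toNat + 2) - 2, by omega⟩
    rw [hm, pvRun_call_base L n (m+1) [] i n acc (Or.inl rfl), pvRun_ret_nil]
    rfl
  · have hi : i ≤ (L.length : Int) := by
      rcases hpre with h | h
      · exact absurd h hs
      · exact h.2
    have hcost := pvCost_le L n ((L.length - i).toNat) i s
    obtain ⟨m, hm⟩ : ∃ m, 2 ^ ((L.length - i).toNat + 2)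
        = pvCost L n ((L.length - i).toNat) i s + (m + 1) :=
      ⟨2 ^ ((L.length - i).toNat + 2) - pvCost L n ((L.length - i).toNat) i s - 1, by omega⟩
    rw [hm, pvSim L n ((L.length - i).toNat) i s hi rfl acc [] (m+1), pvRun_ret_nil]
    rfl
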